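-- pv_equiv track=rewrite | github.com/ivanangelsegurafernandez/EVA-BOT27 | board_features.py | _current_run
-- ===== SOURCE A (Python) =====
-- def _current_run(seq):
--     seq_nz = [x for x in seq if x != 0]
--     if not seq_nz:
--         return 0
--     last = seq_nz[-1]
--     run = 0
--     for x in reversed(seq_nz):
--         if x == last:
--             run += 1
--         else:
--             break
--     return run if last > 0 else -run
-- ===== SOURCE B (Python) =====
-- def _current_run(seq):
--     # Forward pass: maintain the current run of equal nonzero values as we go.
--     last, run = 0, 0
--     for x in seq:
--         if x != 0:
--             run = run + 1 if x == last else 1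
--             last = x
--     return run if last > 0 else -run
-- ===== Notes on version B (the rewrite author's own statement) =====
-- stated objective: alternative
-- what changed: Forward single pass maintaining the current (last, run) accumulator with reset-on-change, instead of A's filter-then-backward scan with break from the end.
import Mathlib
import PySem

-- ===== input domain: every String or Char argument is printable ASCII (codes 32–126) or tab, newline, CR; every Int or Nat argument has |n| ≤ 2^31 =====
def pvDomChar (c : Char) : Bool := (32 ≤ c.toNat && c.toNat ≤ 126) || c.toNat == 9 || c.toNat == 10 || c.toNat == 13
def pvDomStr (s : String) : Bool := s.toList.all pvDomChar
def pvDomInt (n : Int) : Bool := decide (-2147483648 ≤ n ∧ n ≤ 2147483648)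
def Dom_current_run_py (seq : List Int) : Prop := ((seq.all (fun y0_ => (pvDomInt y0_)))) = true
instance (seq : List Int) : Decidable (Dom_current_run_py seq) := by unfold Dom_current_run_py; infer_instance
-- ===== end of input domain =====

-- B replaces A's filter-then-backward-scan-with-break by a single forward pass
-- maintaining a (last, run) accumulator that resets the run when the value changes.

-- ===== PORT A =====
-- the 'for x in reversed(seq_nz): if x == last: run += 1 else: break' loop
def aRun (last : Int) : List Int → Int
  | [] => 0
  | x :: xs => if x = last then aRun last xs + 1 else 0

def current_run_py (seq : List Int) : Int :=
  let seq_nz := seq.filter (fun x => x ≠ 0)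
  if seq_nz = [] then 0
  else
    let last := (PySem.List.pyGet? seq_nz (-1)).getD 0   -- guarded by the nonempty check above
    let run := aRun last seq_nz.reverse
    if last > 0 then run else -run

-- ===== PORT B =====
-- the loop body: skip zeros, extend or reset the current run
def bStep (st : Int × Int) (x : Int) : Int × Int :=
  if x ≠ 0 then (x, if x = st.1 then st.2 + 1 else 1) else st

def current_run_py_alt (seq : List Int) : Int :=
  let st := seq.foldl bStep (0, 0)
  if st.1 > 0 then st.2 else -st.2

-- ===== PRECONDITION & SPEC =====
def Spec_current_run_py (seq : List Int) (out : Int) : Prop := out = current_run_py_alt seq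
instance (seq : List Int) (out : Int) : Decidable (Spec_current_run_py seq out) := by unfold Spec_current_run_py; infer_instance

-- ===== CLAIM (what is proved, stated in full; the proofs are below) =====
def Claim_equal_current_run_py : Prop := ∀ (seq : List Int), Dom_current_run_py seq → Spec_current_run_py seq (current_run_py seq)

-- ===== LEMMAS AND PROOFS =====

-- the last nonzero value of seq (0 if there is none)
def lastNZ (seq : List Int) : Int := ((seq.filter (fun x => x ≠ 0)).getLast?).getD 0

-- invariant of B's fold: state = (last nonzero so far, length of current trailing run)
theorem fold_inv (seq : List Int) :
    seq.foldl bStep (0, 0) = (lastNZ seq, aRun (lastNZ seq) ((seq.filter (fun x => x ≠ 0)).reverse)) := by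
  induction seq using List.reverseRecOn with
  | nil => simp [lastNZ, aRun]
  | append_singleton xs x ih =>
    rw [List.foldl_append, List.foldl_cons, List.foldl_nil, ih]
    by_cases hx0 : x = 0
    · have hf : (xs ++ [x]).filter (fun x => x ≠ 0) = xs.filter (fun x => x ≠ 0) := by
        simp [hx0]
      simp [bStep, hx0, lastNZ]
    · have hf : (xs ++ [x]).filter (fun x => x ≠ 0) = xs.filter (fun x => x ≠ 0) ++ [x] := by
        simp [hx0]
      have hlast : lastNZ (xs ++ [x]) = x := by
        unfold lastNZ; rw [hf]; simp
      rw [hlast, hf, List.reverse_append]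
      simp only [List.reverse_singleton, List.singleton_append]
      by_cases hxl : x = lastNZ xs
      · -- x continues the previous trailing run
        have hrun : aRun x ((xs.filter (fun x => x ≠ 0)).reverse) =
            aRun (lastNZ xs) ((xs.filter (fun x => x ≠ 0)).reverse) := by rw [hxl]
        have hlnz : ¬ lastNZ xs = 0 := hxl ▸ hx0
        simp [bStep, hxl, aRun, hlnz]
      · -- x starts a fresh run: the head of the reversed filter (if any) differs from x
        have hzero : aRun x ((xs.filter (fun x => x ≠ 0)).reverse) = 0 := by
          cases hrev : (xs.filter (fun x => x ≠ 0)).reverse with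
          | nil => simp [aRun]
          | cons h t =>
            have hh : (xs.filter (fun x => x ≠ 0)).getLast? = some h := by
              rw [List.getLast?_eq_head?_reverse, hrev]; rfl
            have : lastNZ xs = h := by unfold lastNZ; rw [hh]; rfl
            have hne : ¬ h = x := fun e => (this ▸ hxl) e.symm
            simp [aRun, hne]
        simp [bStep, hx0, hxl, aRun]
        simpa using hzero

-- ===== VERDICT (by name: the statement is the Claim_ definition above) =====
theorem current_run_py_spec : Claim_equal_current_run_py := by
  intro seq _
  show current_run_py seq = current_run_py_alt seq
  unfold current_run_py current_run_py_alt
  rw [fold_inv]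
  have hlast : (PySem.List.pyGet? (seq.filter (fun x => x ≠ 0)) (-1)).getD 0 = lastNZ seq := by
    rw [PySem.List.pyGet?_neg_one]; rfl
  by_cases h : seq.filter (fun x => x ≠ 0) = []
  · have h0 : lastNZ seq = 0 := by unfold lastNZ; rw [h]; rfl
    rw [h0, if_pos h, h]
    simp [aRun]
  · rw [if_neg h, hlast]
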